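-- pv_equiv track=rewrite | github.com/Alexd-y/argus | backend/src/reports/data_collector.py | executive_severity_totals_from_severity_strings
-- ===== SOURCE A (Python) =====
-- from collections.abc import Iterable
--
-- def executive_severity_totals_from_severity_strings(
--     severities: Iterable[str | None],
-- ) -> dict[str, int]:
--     """Top-5 buckets used in executive table and ``ReportSummary`` (``informational`` → ``info``)."""
--     totals = {k: 0 for k in ("critical", "high", "medium", "low", "info")}
--     alias = {"informational": "info"}
--     for raw in severities:
--         s = (raw or "").strip().lower()
--         if not s:
--             continue
--         s = alias.get(s, s)
--         if s in totals:
--             totals[s] += 1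
--     return totals
-- ===== SOURCE B (Python) =====
-- def executive_severity_totals_from_severity_strings(severities):
--     """Normalize once, then each bucket is a direct count over the normalized list (no dict accumulator)."""
--     norm = [(raw or "").strip().lower() for raw in severities]
--     return {
--         "critical": norm.count("critical"),
--         "high": norm.count("high"),
--         "medium": norm.count("medium"),
--         "low": norm.count("low"),
--         "info": norm.count("info") + norm.count("informational"),
--     }
-- ===== Notes on version B (the rewrite author's own statement) =====
-- stated objective: alternative
-- what changed: B keeps no counter state at all: it normalizes the input once into a list and computes each of the five fixed buckets as a direct list.count over that list ('info' as count('info')+count('informational')), replacing A's dict accumulator with alias lookup, membership test and in-loop increment.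
import Mathlib
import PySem

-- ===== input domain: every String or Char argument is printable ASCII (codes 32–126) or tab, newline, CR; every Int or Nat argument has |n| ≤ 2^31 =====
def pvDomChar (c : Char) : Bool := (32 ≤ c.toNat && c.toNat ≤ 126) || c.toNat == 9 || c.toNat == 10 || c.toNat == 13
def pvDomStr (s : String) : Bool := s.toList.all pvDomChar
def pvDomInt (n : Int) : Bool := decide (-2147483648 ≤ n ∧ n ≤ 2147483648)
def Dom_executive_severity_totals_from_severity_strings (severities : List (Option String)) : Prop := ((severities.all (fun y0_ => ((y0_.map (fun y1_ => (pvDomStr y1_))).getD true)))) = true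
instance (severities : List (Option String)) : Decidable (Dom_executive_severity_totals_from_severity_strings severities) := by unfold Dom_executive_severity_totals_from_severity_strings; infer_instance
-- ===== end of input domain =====

set_option maxHeartbeats 1000000

-- B keeps no counter state: it normalizes the input once into a list and computes each of the
-- five buckets as a direct count over that list ('informational' counted into 'info') —
-- an alternative decomposition of the same O(n) task.

-- ===== PORT A =====
def executive_severity_totals_from_severity_strings (severities : List (Option String)) : List (String × Int) :=
  let totals : PySem.Dict String Int :=
    PySem.Dict.ofList [("critical", 0), ("high", 0), ("medium", 0), ("low", 0), ("info", 0)]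
  let aliasD : PySem.Dict String String := PySem.Dict.ofList [("informational", "info")]
  let totals := severities.foldl (fun totals raw =>
    let s := PySem.Str.lower (PySem.Str.strip (raw.getD ""))
    if s = "" then totals
    else
      let s := aliasD.getD s s
      if totals.contains s then totals.insert s (totals.getD s 0 + 1)
      else totals) totals
  totals.items

-- ===== PORT B =====
def executive_severity_totals_from_severity_strings_alt (severities : List (Option String)) : List (String × Int) :=
  let norm := severities.map (fun raw => PySem.Str.lower (PySem.Str.strip (raw.getD "")))
  [("critical", PySem.List.count norm "critical"),
   ("high", PySem.List.count norm "high"),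
   ("medium", PySem.List.count norm "medium"),
   ("low", PySem.List.count norm "low"),
   ("info", PySem.List.count norm "info" + PySem.List.count norm "informational")]

-- ===== PRECONDITION & SPEC =====
def Spec_executive_severity_totals_from_severity_strings (severities : List (Option String)) (out : List (String × Int)) : Prop := out = executive_severity_totals_from_severity_strings_alt severities
instance (severities : List (Option String)) (out : List (String × Int)) : Decidable (Spec_executive_severity_totals_from_severity_strings severities out) := by unfold Spec_executive_severity_totals_from_severity_strings; infer_instance

-- ===== CLAIM (what is proved, stated in full; the proofs are below) =====
def Claim_equal_executive_severity_totals_from_severity_strings : Prop := ∀ (severities : List (Option String)), Dom_executive_severity_totals_from_severity_strings severities → Spec_executive_severity_totals_from_severity_strings severities (executive_severity_totals_from_severity_strings severities)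

-- ===== LEMMAS AND PROOFS =====

/-- The normalization both versions apply to each raw element. -/
def pvNorm (raw : Option String) : String := PySem.Str.lower (PySem.Str.strip (raw.getD ""))

theorem pvNormEq (raw : Option String) :
    PySem.Str.lower (PySem.Str.strip (raw.getD "")) = pvNorm raw := rfl

/-- The one-entry alias dict: a lookup with default is an if. -/
theorem aliasGetD (s : String) :
    (PySem.Dict.ofList [("informational", "info")]).getD s s = if s = "informational" then "info" else s := by
  simp [PySem.Dict.ofList, PySem.Dict.getD, PySem.Dict.get?, PySem.Dict.update, PySem.Dict.empty,
    PySem.Dict.insert, PySem.Dict.contains]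
  split_ifs with h1 h2 <;> simp_all [eq_comm]

/-- One iteration of A's loop on the five-bucket dict, for a non-empty normalized element. -/
theorem stepFive (a b m l i : Int) (x : Option String) :
    (if (PySem.Dict.mk [("critical", a), ("high", b), ("medium", m), ("low", l), ("info", i)]).contains
          ((PySem.Dict.ofList [("informational", "info")]).getD (pvNorm x) (pvNorm x)) then
        (PySem.Dict.mk [("critical", a), ("high", b), ("medium", m), ("low", l), ("info", i)]).insert
          ((PySem.Dict.ofList [("informational", "info")]).getD (pvNorm x) (pvNorm x))
          ((PySem.Dict.mk [("critical", a), ("high", b), ("medium", m), ("low", l), ("info", i)]).getD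
            ((PySem.Dict.ofList [("informational", "info")]).getD (pvNorm x) (pvNorm x)) 0 + 1)
      else PySem.Dict.mk [("critical", a), ("high", b), ("medium", m), ("low", l), ("info", i)])
    = PySem.Dict.mk [("critical", if pvNorm x = "critical" then a + 1 else a),
        ("high", if pvNorm x = "high" then b + 1 else b),
        ("medium", if pvNorm x = "medium" then m + 1 else m),
        ("low", if pvNorm x = "low" then l + 1 else l),
        ("info", if pvNorm x = "info" ∨ pvNorm x = "informational" then i + 1 else i)] := by
  by_cases h1 : pvNorm x = "critical"
  · simp [h1, PySem.Dict.ofList, PySem.Dict.update, PySem.Dict.empty,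
      PySem.Dict.contains, PySem.Dict.insert, PySem.Dict.getD, PySem.Dict.get?]
  by_cases h2 : pvNorm x = "high"
  · simp [h2, PySem.Dict.ofList, PySem.Dict.update, PySem.Dict.empty,
      PySem.Dict.contains, PySem.Dict.insert, PySem.Dict.getD, PySem.Dict.get?]
  by_cases h3 : pvNorm x = "medium"
  · simp [h3, PySem.Dict.ofList, PySem.Dict.update, PySem.Dict.empty,
      PySem.Dict.contains, PySem.Dict.insert, PySem.Dict.getD, PySem.Dict.get?]
  by_cases h4 : pvNorm x = "low"
  · simp [h4, PySem.Dict.ofList, PySem.Dict.update, PySem.Dict.empty,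
      PySem.Dict.contains, PySem.Dict.insert, PySem.Dict.getD, PySem.Dict.get?]
  by_cases h5 : pvNorm x = "info"
  · simp [h5, PySem.Dict.ofList, PySem.Dict.update, PySem.Dict.empty,
      PySem.Dict.contains, PySem.Dict.insert, PySem.Dict.getD, PySem.Dict.get?]
  by_cases h6 : pvNorm x = "informational"
  · simp [h6, PySem.Dict.ofList, PySem.Dict.update, PySem.Dict.empty,
      PySem.Dict.contains, PySem.Dict.insert, PySem.Dict.getD, PySem.Dict.get?]
  · have ha : (PySem.Dict.ofList [("informational", "info")]).getD (pvNorm x) (pvNorm x) = pvNorm x := by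
      rw [aliasGetD]; exact if_neg h6
    have hc : (PySem.Dict.mk [("critical", a), ("high", b), ("medium", m), ("low", l), ("info", i)]).contains (pvNorm x) = false := by
      simp [PySem.Dict.contains, Ne.symm h1, Ne.symm h2, Ne.symm h3, Ne.symm h4, Ne.symm h5]
    simp [h1, h2, h3, h4, h5, h6, ha, hc]

/-- A's loop over the literal five-key dict: each bucket gains the count of elements normalizing
to it, with `informational` aliased into `info`. -/
theorem foldA (xs : List (Option String)) (a b m l i : Int) :
    xs.foldl (fun (totals : PySem.Dict String Int) (raw : Option String) =>
      if pvNorm raw = "" then totals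
      else
        if totals.contains ((PySem.Dict.ofList [("informational", "info")]).getD (pvNorm raw) (pvNorm raw)) then
          totals.insert ((PySem.Dict.ofList [("informational", "info")]).getD (pvNorm raw) (pvNorm raw))
            (totals.getD ((PySem.Dict.ofList [("informational", "info")]).getD (pvNorm raw) (pvNorm raw)) 0 + 1)
        else totals)
      (PySem.Dict.mk [("critical", a), ("high", b), ("medium", m), ("low", l), ("info", i)])
    = PySem.Dict.mk [("critical", a + ((xs.map pvNorm).count "critical" : Int)),
        ("high", b + ((xs.map pvNorm).count "high" : Int)),
        ("medium", m + ((xs.map pvNorm).count "medium" : Int)),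
        ("low", l + ((xs.map pvNorm).count "low" : Int)),
        ("info", i + ((xs.map pvNorm).count "info" : Int) + ((xs.map pvNorm).count "informational" : Int))] := by
  induction xs generalizing a b m l i with
  | nil => simp
  | cons x xs ih =>
    rw [List.foldl_cons]
    by_cases h0 : pvNorm x = ""
    · rw [if_pos h0, ih]
      have hc : ∀ k : String, k ≠ "" → (List.map pvNorm (x :: xs)).count k = (List.map pvNorm xs).count k := by
        intro k hk
        rw [List.map_cons, List.count_cons, beq_false_of_ne (h0 ▸ Ne.symm hk), if_neg (by simp)]
        omega
      rw [hc "critical" (by decide), hc "high" (by decide), hc "medium" (by decide),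
        hc "low" (by decide), hc "info" (by decide), hc "informational" (by decide)]
    · rw [if_neg h0, stepFive a b m l i x, ih]
      simp only [List.map_cons, List.count_cons, PySem.Dict.mk.injEq, List.cons.injEq,
        Prod.mk.injEq, and_true, true_and]
      refine ⟨?_, ?_, ?_, ?_, ?_⟩
      · by_cases hx : pvNorm x = "critical"
        · rw [if_pos hx, hx, beq_self_eq_true, if_pos rfl]; push_cast; ring
        · rw [if_neg hx, beq_false_of_ne hx, if_neg (by simp)]; push_cast; ring
      · by_cases hx : pvNorm x = "high"
        · rw [if_pos hx, hx, beq_self_eq_true, if_pos rfl]; push_cast; ring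
        · rw [if_neg hx, beq_false_of_ne hx, if_neg (by simp)]; push_cast; ring
      · by_cases hx : pvNorm x = "medium"
        · rw [if_pos hx, hx, beq_self_eq_true, if_pos rfl]; push_cast; ring
        · rw [if_neg hx, beq_false_of_ne hx, if_neg (by simp)]; push_cast; ring
      · by_cases hx : pvNorm x = "low"
        · rw [if_pos hx, hx, beq_self_eq_true, if_pos rfl]; push_cast; ring
        · rw [if_neg hx, beq_false_of_ne hx, if_neg (by simp)]; push_cast; ring
      · by_cases h5 : pvNorm x = "info"
        · rw [if_pos (Or.inl h5), h5, beq_self_eq_true, if_pos rfl,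
            beq_false_of_ne (by decide : ("info" : String) ≠ "informational"), if_neg (by simp)]
          push_cast; ring
        · by_cases h6 : pvNorm x = "informational"
          · rw [if_pos (Or.inr h6), h6, beq_self_eq_true,
              beq_false_of_ne (by decide : ("informational" : String) ≠ "info"), if_neg (by simp), if_pos rfl]
            push_cast; ring
          · rw [if_neg (not_or.mpr ⟨h5, h6⟩), beq_false_of_ne h5, beq_false_of_ne h6, if_neg (by simp)]
            push_cast; ring

-- ===== VERDICT (by name: the statement is the Claim_ definition above) =====
theorem executive_severity_totals_from_severity_strings_spec : Claim_equal_executive_severity_totals_from_severity_strings := by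
  intro severities _
  unfold Spec_executive_severity_totals_from_severity_strings
  simp only [executive_severity_totals_from_severity_strings,
    executive_severity_totals_from_severity_strings_alt, pvNormEq]
  rw [show (PySem.Dict.ofList [("critical", (0:Int)), ("high", 0), ("medium", 0), ("low", 0), ("info", 0)])
      = PySem.Dict.mk [("critical", 0), ("high", 0), ("medium", 0), ("low", 0), ("info", 0)] from rfl]
  rw [foldA]
  simp [PySem.List.count_eq]
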